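-- pv_equiv track=rewrite | github.com/braujian565/envctl | envctl/classifier.py | format_classification_report
-- ===== SOURCE A (Python) =====
-- from typing import Dict, List, Tuple
--
-- LOW = "low"
--
-- MEDIUM = "medium"
--
-- HIGH = "high"
--
-- CRITICAL = "critical"
--
-- RISK_LEVELS = [LOW, MEDIUM, HIGH, CRITICAL]
--
-- _CRITICAL_PATTERNS = ["PROD", "PRODUCTION", "MASTER", "LIVE"]
--
-- _HIGH_PATTERNS = ["SECRET", "PASSWORD", "TOKEN", "PRIVATE_KEY", "API_KEY"]
--
-- _MEDIUM_PATTERNS = ["STAGING", "STAGE", "KEY", "CREDENTIAL", "AUTH"]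
--
-- def _key_risk(key: str) -> str:
--     upper = key.upper()
--     for pat in _CRITICAL_PATTERNS:
--         if pat in upper:
--             return CRITICAL
--     for pat in _HIGH_PATTERNS:
--         if pat in upper:
--             return HIGH
--     for pat in _MEDIUM_PATTERNS:
--         if pat in upper:
--             return MEDIUM
--     return LOW
--
-- def classify_env_set(env: Dict[str, str]) -> Dict[str, str]:
--     """Return a mapping of key -> risk level for every key in *env*."""
--     return {k: _key_risk(k) for k in env}
--
-- def overall_risk(env: Dict[str, str]) -> str:
--     """Return the highest risk level present in *env*."""
--     if not env:
--         return LOW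
--     levels = [_key_risk(k) for k in env]
--     order = {LOW: 0, MEDIUM: 1, HIGH: 2, CRITICAL: 3}
--     return max(levels, key=lambda lvl: order[lvl])
--
-- def format_classification_report(env: Dict[str, str]) -> str:
--     """Return a human-readable classification report."""
--     classification = classify_env_set(env)
--     top = overall_risk(env)
--     lines: List[str] = [f"Overall risk: {top.upper()}", ""]
--     for level in reversed(RISK_LEVELS):
--         keys = [k for k, v in classification.items() if v == level]
--         if keys:
--             lines.append(f"[{level.upper()}]")
--             for k in sorted(keys):
--                 lines.append(f"  {k}")
--     return "\n".join(lines)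
-- ===== SOURCE B (Python) =====
-- LOW = "low"
-- MEDIUM = "medium"
-- HIGH = "high"
-- CRITICAL = "critical"
--
-- _CRITICAL_PATTERNS = ["PROD", "PRODUCTION", "MASTER", "LIVE"]
-- _HIGH_PATTERNS = ["SECRET", "PASSWORD", "TOKEN", "PRIVATE_KEY", "API_KEY"]
-- _MEDIUM_PATTERNS = ["STAGING", "STAGE", "KEY", "CREDENTIAL", "AUTH"]
--
--
-- def _key_risk(key):
--     upper = key.upper()
--     for pat in _CRITICAL_PATTERNS:
--         if pat in upper:
--             return CRITICAL
--     for pat in _HIGH_PATTERNS: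
--         if pat in upper:
--             return HIGH
--     for pat in _MEDIUM_PATTERNS:
--         if pat in upper:
--             return MEDIUM
--     return LOW
--
--
-- def format_classification_report(env):
--     """Single grouping pass into four buckets, then one walk over them."""
--     low, med, high, crit = [], [], [], []
--     for k in env:
--         r = _key_risk(k)
--         if r == CRITICAL:
--             crit.append(k)
--         elif r == HIGH:
--             high.append(k)
--         elif r == MEDIUM:
--             med.append(k)
--         else:
--             low.append(k)
--     top = CRITICAL if crit else HIGH if high else MEDIUM if med else LOW
--     lines = [f"Overall risk: {top.upper()}", ""]
--     for level, bucket in ((CRITICAL, crit), (HIGH, high), (MEDIUM, med), (LOW, low)):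
--         if bucket:
--             lines.append(f"[{level.upper()}]")
--             lines.extend(f"  {k}" for k in sorted(bucket))
--     return "\n".join(lines)
-- ===== Notes on version B (the rewrite author's own statement) =====
-- stated objective: simpler
-- what changed: Replaces the four per-level filtering scans (plus a separate max-by-order scan for the overall risk) with one grouping pass that appends each key to one of four buckets; the top level and each report section are then read straight off the buckets.
import Mathlib
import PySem

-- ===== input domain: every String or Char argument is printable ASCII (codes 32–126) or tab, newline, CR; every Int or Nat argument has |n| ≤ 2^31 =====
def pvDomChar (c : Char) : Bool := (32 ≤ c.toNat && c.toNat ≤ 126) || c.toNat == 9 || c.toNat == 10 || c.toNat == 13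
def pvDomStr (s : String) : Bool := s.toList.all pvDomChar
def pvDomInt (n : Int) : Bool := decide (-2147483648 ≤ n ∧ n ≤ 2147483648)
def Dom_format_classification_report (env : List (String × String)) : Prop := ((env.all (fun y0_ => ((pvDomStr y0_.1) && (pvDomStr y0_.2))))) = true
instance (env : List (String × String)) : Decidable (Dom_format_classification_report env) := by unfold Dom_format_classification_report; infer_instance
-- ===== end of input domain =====

-- B replaces A's four per-level filter scans and separate max-by-order scan by one
-- grouping pass into four buckets; top level and sections are read off the buckets (simpler).
-- env is a Python dict: both ports iterate its keys, i.e. the deduplicated firsts of the list.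

-- ===== PORT A =====
def _CRITICAL_PATTERNS : List String := ["PROD", "PRODUCTION", "MASTER", "LIVE"]
def _HIGH_PATTERNS : List String := ["SECRET", "PASSWORD", "TOKEN", "PRIVATE_KEY", "API_KEY"]
def _MEDIUM_PATTERNS : List String := ["STAGING", "STAGE", "KEY", "CREDENTIAL", "AUTH"]
def RISK_LEVELS : List String := ["low", "medium", "high", "critical"]

-- shared module helper _key_risk (each 'for pat: if pat in upper: return lvl' loop
-- returns a constant, so it is exactly 'any')
def keyRisk (key : String) : String :=
  let upper := PySem.Str.upper key
  if _CRITICAL_PATTERNS.any (fun pat => PySem.Str.isIn pat upper) then "critical"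
  else if _HIGH_PATTERNS.any (fun pat => PySem.Str.isIn pat upper) then "high"
  else if _MEDIUM_PATTERNS.any (fun pat => PySem.Str.isIn pat upper) then "medium"
  else "low"

def classify_env_set (env : List (String × String)) : List (String × String) :=
  (PySem.List.dedup (env.map (·.1))).map (fun k => (k, keyRisk k))

def overall_risk (env : List (String × String)) : String :=
  if env = [] then "low"
  else
    let levels := (PySem.List.dedup (env.map (·.1))).map keyRisk
    let order : PySem.Dict String Int :=
      PySem.Dict.ofList [("low", 0), ("medium", 1), ("high", 2), ("critical", 3)]
    (PySem.List.max? levels (fun lvl => order.getD lvl 0)).getD "low"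

def format_classification_report (env : List (String × String)) : String :=
  let classification := classify_env_set env
  let top := overall_risk env
  let lines : List String := ["Overall risk: " ++ PySem.Str.upper top, ""]
  let lines := RISK_LEVELS.reverse.foldl (fun lines level =>
    let keys := (classification.filter (fun kv => kv.2 == level)).map (·.1)
    if keys ≠ [] then
      (lines ++ ["[" ++ PySem.Str.upper level ++ "]"])
        ++ (PySem.List.sorted keys (fun x => x) false).map (fun k => "  " ++ k)
    else lines) lines
  PySem.Str.join "\n" lines

-- ===== PORT B =====
-- one grouping pass: state is the four buckets (low, medium, high, critical)
def bStep (b : List String × List String × List String × List String) (k : String) :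
    List String × List String × List String × List String :=
  let r := keyRisk k
  if r = "critical" then (b.1, b.2.1, b.2.2.1, b.2.2.2 ++ [k])
  else if r = "high" then (b.1, b.2.1, b.2.2.1 ++ [k], b.2.2.2)
  else if r = "medium" then (b.1, b.2.1 ++ [k], b.2.2.1, b.2.2.2)
  else (b.1 ++ [k], b.2.1, b.2.2.1, b.2.2.2)

def bSection (level : String) (bucket : List String) : List String :=
  if bucket ≠ [] then
    ("[" ++ PySem.Str.upper level ++ "]")
      :: (PySem.List.sorted bucket (fun x => x) false).map (fun k => "  " ++ k)
  else []

def format_classification_report_alt (env : List (String × String)) : String :=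
  let bs := (PySem.List.dedup (env.map (·.1))).foldl bStep ([], [], [], [])
  let top := if bs.2.2.2 ≠ [] then "critical"
    else if bs.2.2.1 ≠ [] then "high"
    else if bs.2.1 ≠ [] then "medium"
    else "low"
  PySem.Str.join "\n"
    (("Overall risk: " ++ PySem.Str.upper top) :: "" ::
      (bSection "critical" bs.2.2.2 ++ bSection "high" bs.2.2.1
        ++ bSection "medium" bs.2.1 ++ bSection "low" bs.1))

-- ===== PRECONDITION & SPEC =====
def Spec_format_classification_report (env : List (String × String)) (out : String) : Prop := out = format_classification_report_alt env
instance (env : List (String × String)) (out : String) : Decidable (Spec_format_classification_report env out) := by unfold Spec_format_classification_report; infer_instance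

-- ===== CLAIM (what is proved, stated in full; the proofs are below) =====
def Claim_equal_format_classification_report : Prop := ∀ (env : List (String × String)), Dom_format_classification_report env → Spec_format_classification_report env (format_classification_report env)

-- ===== LEMMAS AND PROOFS =====

theorem keyRisk_cases (k : String) :
    keyRisk k = "low" ∨ keyRisk k = "medium" ∨ keyRisk k = "high" ∨ keyRisk k = "critical" := by
  unfold keyRisk
  dsimp only
  split_ifs <;> simp

theorem buckets_eq (ks : List String) (a b c d : List String) :
    ks.foldl bStep (a, b, c, d) =
      (a ++ ks.filter (fun k => keyRisk k == "low"),
       b ++ ks.filter (fun k => keyRisk k == "medium"),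
       c ++ ks.filter (fun k => keyRisk k == "high"),
       d ++ ks.filter (fun k => keyRisk k == "critical")) := by
  induction ks generalizing a b c d with
  | nil => simp
  | cons k ks ih =>
    rcases keyRisk_cases k with h | h | h | h <;>
      simp [List.foldl_cons, bStep, h, ih]

theorem top_eq (ks : List String) (hne : ks ≠ []) :
    (PySem.List.max? (ks.map keyRisk)
        (fun lvl => (PySem.Dict.ofList [("low", (0:Int)), ("medium", 1), ("high", 2), ("critical", 3)]).getD lvl 0)).getD "low" =
      (if ks.filter (fun k => keyRisk k == "critical") ≠ [] then "critical"
       else if ks.filter (fun k => keyRisk k == "high") ≠ [] then "high"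
       else if ks.filter (fun k => keyRisk k == "medium") ≠ [] then "medium"
       else "low") := by
  set ord := fun lvl => (PySem.Dict.ofList [("low", (0:Int)), ("medium", 1), ("high", 2), ("critical", 3)]).getD lvl 0 with hord
  have hmemf : ∀ lvl, ks.filter (fun k => keyRisk k == lvl) ≠ [] ↔ lvl ∈ ks.map keyRisk := by
    intro lvl
    constructor
    · intro h
      obtain ⟨x, hx⟩ := List.exists_mem_of_ne_nil _ h
      have hx' := List.mem_filter.1 hx
      exact List.mem_map.2 ⟨x, hx'.1, by simpa using hx'.2⟩
    · intro h hnil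
      obtain ⟨k, hk, hkr⟩ := List.mem_map.1 h
      have : k ∈ ks.filter (fun k => keyRisk k == lvl) := List.mem_filter.2 ⟨hk, by simp [hkr]⟩
      simp [hnil] at this
  obtain ⟨m, hm⟩ : ∃ m, PySem.List.max? (ks.map keyRisk) ord = some m := by
    rcases h : PySem.List.max? (ks.map keyRisk) ord with _ | m
    · exact absurd (by simpa [List.map_eq_nil_iff] using (PySem.List.max?_eq_none_iff _ _).1 h) hne
    · exact ⟨m, rfl⟩
  have hmem := PySem.List.max?_mem hm
  have hmax := PySem.List.max?_isMax hm
  obtain ⟨k0, _, hk0⟩ := List.mem_map.1 hmem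
  rw [hm]
  rcases keyRisk_cases k0 with h0 | h0 | h0 | h0 <;> rw [h0] at hk0 <;> subst hk0
  · -- m = "low": nothing above low is present
    have hc : "critical" ∉ ks.map keyRisk := fun h => by
      have := hmax _ h; rw [hord] at this; revert this; decide
    have hh : "high" ∉ ks.map keyRisk := fun h => by
      have := hmax _ h; rw [hord] at this; revert this; decide
    have hmd : "medium" ∉ ks.map keyRisk := fun h => by
      have := hmax _ h; rw [hord] at this; revert this; decide
    rw [if_neg (by simpa [hmemf] using hc), if_neg (by simpa [hmemf] using hh),
        if_neg (by simpa [hmemf] using hmd)]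
    rfl
  · have hc : "critical" ∉ ks.map keyRisk := fun h => by
      have := hmax _ h; rw [hord] at this; revert this; decide
    have hh : "high" ∉ ks.map keyRisk := fun h => by
      have := hmax _ h; rw [hord] at this; revert this; decide
    rw [if_neg (by simpa [hmemf] using hc), if_neg (by simpa [hmemf] using hh),
        if_pos ((hmemf _).2 hmem)]
    rfl
  · have hc : "critical" ∉ ks.map keyRisk := fun h => by
      have := hmax _ h; rw [hord] at this; revert this; decide
    rw [if_neg (by simpa [hmemf] using hc), if_pos ((hmemf _).2 hmem)]
    rfl
  · rw [if_pos ((hmemf _).2 hmem)]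
    rfl

theorem classification_keys (ks : List String) (lvl : String) :
    ((ks.map (fun k => (k, keyRisk k))).filter (fun kv => kv.2 == lvl)).map (·.1) =
      ks.filter (fun k => keyRisk k == lvl) := by
  induction ks with
  | nil => rfl
  | cons k ks ih => by_cases h : keyRisk k == lvl <;> simp [h, ih]

theorem format_classification_report_spec : Claim_equal_format_classification_report := by
  intro env _
  unfold Spec_format_classification_report format_classification_report
    format_classification_report_alt classify_env_set overall_risk
  rcases heq : env with _ | ⟨p, rest⟩
  · decide
  rw [← heq]
  have henv : env ≠ [] := by simp [heq]
  have hks : PySem.List.dedup (env.map (·.1)) ≠ [] := by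
    rw [heq]
    intro h0
    have hp : p.1 ∈ PySem.List.dedup ((p :: rest).map (·.1)) := by
      rw [PySem.List.mem_dedup]; simp
    rw [h0] at hp
    simp at hp
  set ks := PySem.List.dedup (env.map (·.1)) with hksdef
  dsimp only
  rw [if_neg henv]
  rw [buckets_eq, top_eq ks hks]
  have hck := classification_keys ks
  simp only [hck, List.nil_append, RISK_LEVELS, List.reverse_cons,
    List.reverse_nil, List.cons_append, List.foldl_cons, List.foldl_nil, bSection]
  split_ifs <;> simp [PySem.Str.join, List.append_assoc]
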